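-- pv_equiv track=rewrite | github.com/quantitativenurse/sud-regex | unittests/test_regression_golden.py | _best_header_rename
-- ===== SOURCE A (Python) =====
-- HEADER_SYNONYMS = {
--     "grid": {"grid"},
--     "note_id": {"note_id", "id", "note id", "noteid"},
--     "note_text": {"note_text", "text", "note text", "notetext"},
-- }
--
-- def _best_header_rename(cols):
--     norm = {c: c.strip().lower() for c in cols}
--     rename = {}
--     for want, alts in HEADER_SYNONYMS.items():
--         for c, n in norm.items():
--             if n in alts:
--                 rename[c] = want
--                 break
--     return rename
-- ===== SOURCE B (Python) =====
-- HEADER_SYNONYMS = {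
--     "grid": {"grid"},
--     "note_id": {"note_id", "id", "note id", "noteid"},
--     "note_text": {"note_text", "text", "note text", "notetext"},
-- }
--
-- def _best_header_rename(cols):
--     # Reverse index: normalized synonym -> canonical header.
--     index = {alt: want for want, alts in HEADER_SYNONYMS.items() for alt in alts}
--     best = {}
--     for c in cols:
--         want = index.get(c.strip().lower())
--         if want is not None and want not in best:
--             best[want] = c
--     return {best[want]: want for want in HEADER_SYNONYMS if want in best}
-- ===== Notes on version B (the rewrite author's own statement) =====
-- stated objective: alternative
-- what changed: Replaces the targets-by-columns nested scan with a reverse index from normalized synonym to canonical header plus one indexed pass over the columns that records the first column per canonical; the result is then emitted in canonical-header order.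
import Mathlib
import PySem

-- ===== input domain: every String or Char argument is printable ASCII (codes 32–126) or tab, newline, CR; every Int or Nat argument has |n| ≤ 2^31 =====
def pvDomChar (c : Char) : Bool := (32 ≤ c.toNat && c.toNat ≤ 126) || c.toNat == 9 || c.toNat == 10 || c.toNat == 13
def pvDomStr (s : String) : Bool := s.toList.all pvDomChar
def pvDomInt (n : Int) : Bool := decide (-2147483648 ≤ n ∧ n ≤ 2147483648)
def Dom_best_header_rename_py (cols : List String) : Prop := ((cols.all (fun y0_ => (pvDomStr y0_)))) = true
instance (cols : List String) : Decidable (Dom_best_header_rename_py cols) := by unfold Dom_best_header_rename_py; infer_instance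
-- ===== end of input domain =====

-- B replaces A's targets×columns nested scan by a reverse synonym→canonical index and one
-- indexed pass over the columns that records the first column per canonical header (objective: alternative).

-- HEADER_SYNONYMS, shared module-level data of both versions
def headerSynonyms : List (String × List String) :=
  [("grid", ["grid"]),
   ("note_id", ["note_id", "id", "note id", "noteid"]),
   ("note_text", ["note_text", "text", "note text", "notetext"])]

-- c.strip().lower(), used by both versions
def normOf (c : String) : String := PySem.Str.lower (PySem.Str.strip c)

-- ===== PORT A =====
-- inner 'for c, n in norm.items(): if n in alts: rename[c] = want; break'
def aInner (items : List (String × String)) (alts : List String)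
    (r : PySem.Dict String String) (want : String) : PySem.Dict String String :=
  match items with
  | [] => r
  | (c, n) :: rest => if alts.contains n then r.insert c want else aInner rest alts r want

def best_header_rename_py (cols : List String) : List (String × String) :=
  let norm := cols.foldl
    (fun d c => d.insert c (normOf c)) PySem.Dict.empty
  (headerSynonyms.foldl (fun r wa => aInner norm.items wa.2 r wa.1)
    (PySem.Dict.empty : PySem.Dict String String)).items

-- ===== PORT B =====
-- reverse index: normalized synonym -> canonical header
def synIndex : PySem.Dict String String :=
  headerSynonyms.foldl (fun d wa => wa.2.foldl (fun d alt => d.insert alt wa.1) d)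
    PySem.Dict.empty

def best_header_rename_py_alt (cols : List String) : List (String × String) :=
  let best := cols.foldl
    (fun b c =>
      match synIndex.get? (normOf c) with
      | some want => if b.contains want then b else b.insert want c
      | none => b)
    (PySem.Dict.empty : PySem.Dict String String)
  (headerSynonyms.foldl
    (fun r wa =>
      match best.get? wa.1 with
      | some c => r.insert c wa.1
      | none => r)
    (PySem.Dict.empty : PySem.Dict String String)).items

-- ===== PRECONDITION & SPEC =====
def Spec_best_header_rename_py (cols : List String) (out : List (String × String)) : Prop := out = best_header_rename_py_alt cols
instance (cols : List String) (out : List (String × String)) : Decidable (Spec_best_header_rename_py cols out) := by unfold Spec_best_header_rename_py; infer_instance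

-- ===== CLAIM (what is proved, stated in full; the proofs are below) =====
def Claim_equal_best_header_rename_py : Prop := ∀ (cols : List String), Dom_best_header_rename_py cols → Spec_best_header_rename_py cols (best_header_rename_py cols)

-- ===== LEMMAS AND PROOFS =====

-- A's inner loop-with-break is a first-match search over the items list
theorem aInner_eq_find (items : List (String × String)) (alts : List String)
    (r : PySem.Dict String String) (want : String) :
    aInner items alts r want =
      match items.find? (fun cn => alts.contains cn.2) with
      | some cn => r.insert cn.1 want
      | none => r := by
  induction items with
  | nil => rfl
  | cons p rest ih =>
    obtain ⟨c, n⟩ := p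
    by_cases h : n ∈ alts
    · simp [aInner, List.find?, h]
    · simp only [aInner, List.find?]
      simp [h, ih]

-- searching the norm dict's items for a normalized-value property = searching cols directly
theorem norm_items_find (P : String → Bool) :
    ∀ (cols : List String) (d : PySem.Dict String String),
      (∀ p ∈ d.items, p.2 = normOf p.1) →
      ((cols.foldl (fun d c => d.insert c (normOf c)) d).items.find? (fun cn => P cn.2)) =
        (d.items.find? (fun cn => P cn.2)).orElse
          (fun _ => (cols.find? (fun c => P (normOf c))).map (fun c => (c, normOf c))) := by
  intro cols
  induction cols with
  | nil => intro d _; cases h : d.items.find? (fun cn => P cn.2) <;> simp [Option.orElse, h]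
  | cons c rest ih =>
    intro d hinv
    simp only [List.foldl_cons]
    by_cases hc : d.contains c
    · -- overwrite in place with the same value: items unchanged
      have hitems : (d.insert c (normOf c)).items = d.items := by
        rw [PySem.Dict.items_insert_of_contains _ _ hc]
        conv_rhs => rw [← List.map_id d.items]
        apply List.map_congr_left
        intro p hp
        by_cases hpc : p.1 = c
        · have h2 : p.2 = normOf p.1 := hinv p hp
          have : p = (c, normOf c) := by
            obtain ⟨p1, p2⟩ := p
            simp at hpc h2 ⊢
            exact ⟨hpc, by rw [h2, hpc]⟩
          simp [this]
        · simp [hpc]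
      have hinv' : ∀ p ∈ (d.insert c (normOf c)).items, p.2 = normOf p.1 := by
        rw [hitems]; exact hinv
      rw [ih _ hinv', hitems]
      by_cases hP : P (normOf c)
      · -- d already holds an item for key c with value normOf c, so the items search succeeds
        have hex : ∃ q, d.items.find? (fun cn => P cn.2) = some q := by
          have hk : c ∈ d.keys := (PySem.Dict.contains_iff_mem_keys d c).mp hc
          have hv : ∃ v, (c, v) ∈ d.items := by
            simp only [PySem.Dict.keys, List.mem_map] at hk
            obtain ⟨p, hp, hp1⟩ := hk
            exact ⟨p.2, by rwa [show (c, p.2) = p by ext <;> simp [← hp1]]⟩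
          obtain ⟨v, hv⟩ := hv
          have hvP : P v = true := by
            have h2 := hinv (c, v) hv
            simp at h2
            rw [h2]; exact hP
          rcases h : d.items.find? (fun cn => P cn.2) with _ | q
          · have hfalse := List.find?_eq_none.mp h (c, v) hv
            simp [hvP] at hfalse
          · exact ⟨q, h⟩
        obtain ⟨q, hq⟩ := hex
        simp [hq, Option.orElse, List.find?, hP]
      · simp [List.find?, hP]
    · -- fresh key: appended at the end
      have hitems : (d.insert c (normOf c)).items = d.items ++ [(c, normOf c)] :=
        PySem.Dict.items_insert_of_not_contains _ _ (by simpa using hc)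
      have hinv' : ∀ p ∈ (d.insert c (normOf c)).items, p.2 = normOf p.1 := by
        rw [hitems]; intro p hp
        rcases List.mem_append.mp hp with h | h
        · exact hinv p h
        · simp at h; simp [h]
      rw [ih _ hinv', hitems, List.find?_append]
      rcases h1 : d.items.find? (fun cn => P cn.2) with _ | q
      · by_cases hP : P (normOf c) <;> simp [List.find?, hP, Option.orElse, h1]
      · simp [Option.orElse, h1, List.find?]

-- B's pass: best.get? w is the first column whose index lookup yields w
theorem best_get (w : String) :
    ∀ (cols : List String) (b : PySem.Dict String String),
      (cols.foldl
        (fun b c =>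
          match synIndex.get? (normOf c) with
          | some want => if b.contains want then b else b.insert want c
          | none => b) b).get? w =
      (b.get? w).orElse
        (fun _ => cols.find? (fun c => synIndex.get? (normOf c) == some w)) := by
  intro cols
  induction cols with
  | nil => intro b; cases h : b.get? w <;> simp [Option.orElse, h]
  | cons c rest ih =>
    intro b
    simp only [List.foldl_cons]
    rcases hidx : synIndex.get? (normOf c) with _ | w0
    · rw [ih]
      simp [List.find?, hidx]
    · by_cases hb : b.contains w0
      · simp only [if_pos hb]
        rw [ih]
        by_cases hw : w0 = w
        · subst hw
          have : ∃ v, b.get? w0 = some v := by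
            rcases h : b.get? w0 with _ | v
            · exfalso
              rw [PySem.Dict.contains_eq_isSome_get?, h] at hb; simp at hb
            · exact ⟨v, rfl⟩
          obtain ⟨v, hv⟩ := this
          simp [hv, Option.orElse]
        · have : (synIndex.get? (normOf c) == some w) = false := by
            simp [hidx, hw]
          simp [List.find?, this]
      · simp only [hidx, if_neg hb]
        rw [ih]
        by_cases hw : w0 = w
        · subst hw
          have hbn : b.get? w0 = none := by
            rcases h : b.get? w0 with _ | v
            · rfl
            · rw [PySem.Dict.contains_eq_isSome_get?, h] at hb; simp at hb
          rw [PySem.Dict.get?_insert_self]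
          simp [hbn, List.find?, hidx, Option.orElse]
        · rw [PySem.Dict.get?_insert_of_ne _ _ (fun h => hw h.symm)]
          have : (synIndex.get? (normOf c) == some w) = false := by
            simp [hidx, hw]
          simp [List.find?, this]

-- the reverse index agrees with the synonym sets, per canonical header
theorem synIndex_grid (s : String) :
    (synIndex.get? s == some "grid") = (["grid"] : List String).contains s := by
  simp only [synIndex, headerSynonyms, List.foldl]
  by_cases h : s = "grid"
  · subst h; decide
  · have g : ¬ ("grid" = s) := fun e => h e.symm
    simp [PySem.Dict.empty, PySem.Dict.insert, PySem.Dict.get?, h, g]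

theorem synIndex_note_id (s : String) :
    (synIndex.get? s == some "note_id") =
      (["note_id", "id", "note id", "noteid"] : List String).contains s := by
  simp only [synIndex, headerSynonyms, List.foldl]
  by_cases h1 : s = "grid"
  · subst h1; decide
  · by_cases h2 : s = "note_id"
    · subst h2; decide
    · by_cases h3 : s = "id"
      · subst h3; decide
      · by_cases h4 : s = "note id"
        · subst h4; decide
        · by_cases h5 : s = "noteid"
          · subst h5; decide
          · by_cases h6 : s = "note_text"
            · subst h6; decide
            · by_cases h7 : s = "text"
              · subst h7; decide
              · by_cases h8 : s = "note text"
                · subst h8; decide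
                · by_cases h9 : s = "notetext"
                  · subst h9; decide
                  ·
                    have g1 : ¬ ("grid" = s) := fun e => h1 e.symm
                    have g2 : ¬ ("note_id" = s) := fun e => h2 e.symm
                    have g3 : ¬ ("id" = s) := fun e => h3 e.symm
                    have g4 : ¬ ("note id" = s) := fun e => h4 e.symm
                    have g5 : ¬ ("noteid" = s) := fun e => h5 e.symm
                    have g6 : ¬ ("note_text" = s) := fun e => h6 e.symm
                    have g7 : ¬ ("text" = s) := fun e => h7 e.symm
                    have g8 : ¬ ("note text" = s) := fun e => h8 e.symm
                    have g9 : ¬ ("notetext" = s) := fun e => h9 e.symm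
                    simp [PySem.Dict.empty, PySem.Dict.insert, PySem.Dict.get?,
                      h1, h2, h3, h4, h5, h6, h7, h8, h9, g1, g2, g3, g4, g5, g6, g7, g8, g9]

theorem synIndex_note_text (s : String) :
    (synIndex.get? s == some "note_text") =
      (["note_text", "text", "note text", "notetext"] : List String).contains s := by
  simp only [synIndex, headerSynonyms, List.foldl]
  by_cases h1 : s = "grid"
  · subst h1; decide
  · by_cases h2 : s = "note_id"
    · subst h2; decide
    · by_cases h3 : s = "id"
      · subst h3; decide
      · by_cases h4 : s = "note id"
        · subst h4; decide
        · by_cases h5 : s = "noteid"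
          · subst h5; decide
          · by_cases h6 : s = "note_text"
            · subst h6; decide
            · by_cases h7 : s = "text"
              · subst h7; decide
              · by_cases h8 : s = "note text"
                · subst h8; decide
                · by_cases h9 : s = "notetext"
                  · subst h9; decide
                  ·
                    have g1 : ¬ ("grid" = s) := fun e => h1 e.symm
                    have g2 : ¬ ("note_id" = s) := fun e => h2 e.symm
                    have g3 : ¬ ("id" = s) := fun e => h3 e.symm
                    have g4 : ¬ ("note id" = s) := fun e => h4 e.symm
                    have g5 : ¬ ("noteid" = s) := fun e => h5 e.symm
                    have g6 : ¬ ("note_text" = s) := fun e => h6 e.symm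
                    have g7 : ¬ ("text" = s) := fun e => h7 e.symm
                    have g8 : ¬ ("note text" = s) := fun e => h8 e.symm
                    have g9 : ¬ ("notetext" = s) := fun e => h9 e.symm
                    simp [PySem.Dict.empty, PySem.Dict.insert, PySem.Dict.get?,
                      h1, h2, h3, h4, h5, h6, h7, h8, h9, g1, g2, g3, g4, g5, g6, g7, g8, g9]

-- ===== VERDICT (by name: the statement is the Claim_ definition above) =====
theorem best_header_rename_py_spec : Claim_equal_best_header_rename_py := by
  intro cols _
  unfold Spec_best_header_rename_py best_header_rename_py best_header_rename_py_alt
  simp only [headerSynonyms, List.foldl]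
  rw [aInner_eq_find, aInner_eq_find, aInner_eq_find]
  have hA : ∀ P : String → Bool,
      ((cols.foldl (fun d c => d.insert c (normOf c)) PySem.Dict.empty).items.find?
        (fun cn => P cn.2)) =
        (cols.find? (fun c => P (normOf c))).map (fun c => (c, normOf c)) := by
    intro P
    rw [norm_items_find P cols PySem.Dict.empty
      (by intro p hp; simp [PySem.Dict.empty, PySem.Dict.items] at hp)]
    simp [PySem.Dict.empty, Option.orElse]
  have hB : ∀ w : String,
      (cols.foldl
        (fun b c =>
          match synIndex.get? (normOf c) with
          | some want => if b.contains want then b else b.insert want c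
          | none => b) PySem.Dict.empty).get? w =
        cols.find? (fun c => synIndex.get? (normOf c) == some w) := by
    intro w
    rw [best_get w cols PySem.Dict.empty]
    simp [PySem.Dict.empty, PySem.Dict.get?, Option.orElse]
  simp only [hA, hB]
  simp only [synIndex_grid, synIndex_note_id, synIndex_note_text]
  rcases cols.find? (fun c => (["grid"] : List String).contains (normOf c)) with _ | c1 <;>
    rcases cols.find? (fun c => (["note_id", "id", "note id", "noteid"] : List String).contains (normOf c)) with _ | c2 <;>
      rcases cols.find? (fun c => (["note_text", "text", "note text", "notetext"] : List String).contains (normOf c)) with _ | c3 <;>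
        rfl
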